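-- pv_equiv track=rewrite | github.com/quanticworld/adventOfCode2024 | day9/code.py | expand_from_allocation_table
-- ===== SOURCE A (Python) =====
-- from collections import defaultdict
--
-- def expand_from_allocation_table(allocation_table):
--     result = defaultdict(list)
--     current_insert_index = 0
--     for idx, value in enumerate(allocation_table):
--         if int(value) > 0:
--             if idx % 2 == 0:
--                 for i in range(int(value)):
--                     result[idx // 2].append(current_insert_index)
--                     current_insert_index += 1
--             else:
--                 for i in range(int(value)):
--                     result[-1].append(current_insert_index)
--                     current_insert_index += 1
--     return result
-- ===== SOURCE B (Python) =====
-- from collections import defaultdict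
--
-- def expand_from_allocation_table(allocation_table):
--     # Precompute each entry's starting offset (prefix sums of positive sizes),
--     # then assign each block as one contiguous range -- no per-unit counter loop.
--     starts = []
--     total = 0
--     for value in allocation_table:
--         starts.append(total)
--         total += max(int(value), 0)
--     result = defaultdict(list)
--     for idx, (value, start) in enumerate(zip(allocation_table, starts)):
--         v = int(value)
--         if v > 0:
--             key = idx // 2 if idx % 2 == 0 else -1
--             result[key].extend(range(start, start + v))
--     return result
-- ===== Notes on version B (the rewrite author's own statement) =====
-- stated objective: alternative
-- what changed: A interleaves a running insert-index counter with per-unit nested append loops; B first precomputes a prefix-offset table in one pass and then, zipping it with the entries, extends each key with one contiguous range per entry, removing the per-unit inner loop and the counter from the dict-building pass.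
import Mathlib
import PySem

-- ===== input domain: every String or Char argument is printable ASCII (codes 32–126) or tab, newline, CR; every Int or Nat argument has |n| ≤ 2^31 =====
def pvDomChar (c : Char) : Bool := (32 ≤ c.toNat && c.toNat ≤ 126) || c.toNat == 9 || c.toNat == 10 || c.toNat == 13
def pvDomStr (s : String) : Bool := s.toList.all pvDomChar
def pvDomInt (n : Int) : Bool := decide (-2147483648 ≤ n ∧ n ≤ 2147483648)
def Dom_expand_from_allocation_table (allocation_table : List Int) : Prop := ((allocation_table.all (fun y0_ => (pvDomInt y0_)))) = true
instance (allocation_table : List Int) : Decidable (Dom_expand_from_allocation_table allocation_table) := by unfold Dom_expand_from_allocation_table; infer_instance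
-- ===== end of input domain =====

-- B replaces A's per-unit counter loops by a precomputed prefix-offset table and
-- one contiguous-range extension per entry (different decomposition; no speed claim).

-- ===== PORT A =====
def expand_from_allocation_table (allocation_table : List Int) : List (Int × List Int) :=
  let fin := (PySem.List.enumerate allocation_table 0).foldl
    (fun (s : PySem.Dict Int (List Int) × Int) (e : Int × Int) =>
      let idx := e.1
      let value := e.2
      if value > 0 then
        if PySem.Int.mod idx 2 = 0 then
          (PySem.List.pyRange 0 value 1).foldl
            (fun (s : PySem.Dict Int (List Int) × Int) _ =>
              (s.1.modify (PySem.Int.floordiv idx 2) [] (fun l => l ++ [s.2]), s.2 + 1)) s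
        else
          (PySem.List.pyRange 0 value 1).foldl
            (fun (s : PySem.Dict Int (List Int) × Int) _ =>
              (s.1.modify (-1) [] (fun l => l ++ [s.2]), s.2 + 1)) s
      else s)
    (PySem.Dict.empty, 0)
  fin.1.items

-- ===== PORT B =====
def expand_from_allocation_table_alt (allocation_table : List Int) : List (Int × List Int) :=
  let p := allocation_table.foldl
    (fun (st : List Int × Int) value => (st.1 ++ [st.2], st.2 + max value 0)) ([], 0)
  let starts := p.1
  let result := (PySem.List.enumerate (allocation_table.zip starts) 0).foldl
    (fun (d : PySem.Dict Int (List Int)) (e : Int × (Int × Int)) =>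
      let idx := e.1
      let v := e.2.1
      let start := e.2.2
      if v > 0 then
        d.modify (if PySem.Int.mod idx 2 = 0 then PySem.Int.floordiv idx 2 else -1) []
          (fun l => l ++ PySem.List.pyRange start (start + v) 1)
      else d)
    PySem.Dict.empty
  result.items

-- ===== PRECONDITION & SPEC =====
def Spec_expand_from_allocation_table (allocation_table : List Int) (out : List (Int × List Int)) : Prop := out = expand_from_allocation_table_alt allocation_table
instance (allocation_table : List Int) (out : List (Int × List Int)) : Decidable (Spec_expand_from_allocation_table allocation_table out) := by unfold Spec_expand_from_allocation_table; infer_instance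

-- ===== CLAIM (what is proved, stated in full; the proofs are below) =====
def Claim_equal_expand_from_allocation_table : Prop := ∀ (allocation_table : List Int), Dom_expand_from_allocation_table allocation_table → Spec_expand_from_allocation_table allocation_table (expand_from_allocation_table allocation_table)

-- ===== LEMMAS AND PROOFS =====

-- A's loop step (exactly the lambda of port A), named for the proofs
def pvStepA : (PySem.Dict Int (List Int) × Int) → (Int × Int) → (PySem.Dict Int (List Int) × Int) :=
  fun s e =>
    let idx := e.1
    let value := e.2
    if value > 0 then
      if PySem.Int.mod idx 2 = 0 then
        (PySem.List.pyRange 0 value 1).foldl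
          (fun (s : PySem.Dict Int (List Int) × Int) _ =>
            (s.1.modify (PySem.Int.floordiv idx 2) [] (fun l => l ++ [s.2]), s.2 + 1)) s
      else
        (PySem.List.pyRange 0 value 1).foldl
          (fun (s : PySem.Dict Int (List Int) × Int) _ =>
            (s.1.modify (-1) [] (fun l => l ++ [s.2]), s.2 + 1)) s
    else s

-- B's loop step (exactly the lambda of port B)
def pvStepB : PySem.Dict Int (List Int) → (Int × (Int × Int)) → PySem.Dict Int (List Int) :=
  fun d e =>
    let idx := e.1
    let v := e.2.1
    let start := e.2.2
    if v > 0 then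
      d.modify (if PySem.Int.mod idx 2 = 0 then PySem.Int.floordiv idx 2 else -1) []
        (fun l => l ++ PySem.List.pyRange start (start + v) 1)
    else d

-- the prefix-offset table B computes, in recursive form
def pvOffs (c : Int) : List Int → List Int
  | [] => []
  | v :: t => c :: pvOffs (c + max v 0) t

lemma pvStarts_fst (l : List Int) : ∀ (acc : List Int) (c : Int),
    (l.foldl (fun (st : List Int × Int) value => (st.1 ++ [st.2], st.2 + max value 0)) (acc, c)).1
      = acc ++ pvOffs c l := by
  induction l with
  | nil => intro acc c; simp [pvOffs]
  | cons v t ih =>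
      intro acc c
      simp only [List.foldl_cons, pvOffs]
      rw [ih (acc ++ [c]) (c + max v 0)]
      simp

lemma pvModify_merge (d : PySem.Dict Int (List Int)) (k : Int) (xs ys : List Int) :
    (d.modify k [] (fun l => l ++ xs)).modify k [] (fun l => l ++ ys)
      = d.modify k [] (fun l => l ++ (xs ++ ys)) := by
  show (d.insert k (d.getD k [] ++ xs)).insert k
      ((d.insert k (d.getD k [] ++ xs)).getD k [] ++ ys) = d.insert k (d.getD k [] ++ (xs ++ ys))
  rw [PySem.Dict.getD_insert_self, PySem.Dict.insert_insert_self, List.append_assoc]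

-- A's inner per-unit append loop equals one modify with a contiguous range
lemma pvInner (k : Int) : ∀ (n : Nat) (d : PySem.Dict Int (List Int)) (c : Int), 0 < n →
    (List.range n).foldl
        (fun (s : PySem.Dict Int (List Int) × Int) (_ : Nat) =>
          (s.1.modify k [] (fun l => l ++ [s.2]), s.2 + 1)) (d, c)
      = (d.modify k [] (fun l => l ++ PySem.List.pyRange c (c + n) 1), c + n) := by
  intro n
  induction n with
  | zero => intro d c h; omega
  | succ m ih =>
      intro d c _
      by_cases hm : 0 < m
      · rw [List.range_succ, List.foldl_append, ih d c hm]
        simp only [List.foldl_cons, List.foldl_nil]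
        rw [pvModify_merge]
        have h1 : (c : Int) ≤ c + m := by omega
        rw [← PySem.List.pyRange_one_succ_right h1,
          show c + ((m + 1 : Nat) : Int) = c + (m : Int) + 1 from by push_cast; ring]
      · have : m = 0 := by omega
        subst this
        simp only [List.range_succ, List.range_zero, List.nil_append, List.foldl_cons,
          List.foldl_nil]
        rw [show c + ((0 + 1 : Nat) : Int) = c + 1 from by push_cast; ring,
          PySem.List.pyRange_one_singleton]

-- the main invariant: A's fold with counter c equals B's fold zipped with pvOffs c
lemma pvMain : ∀ (l : List Int) (i c : Int) (d : PySem.Dict Int (List Int)),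
    ((PySem.List.enumerate l i).foldl pvStepA (d, c)).1
      = (PySem.List.enumerate (l.zip (pvOffs c l)) i).foldl pvStepB d := by
  intro l
  induction l with
  | nil => intro i c d; simp [PySem.List.enumerate_nil]
  | cons v t ih =>
      intro i c d
      simp only [pvOffs, List.zip_cons_cons, PySem.List.enumerate_cons, List.foldl_cons]
      by_cases hv : v > 0
      · have hn : 0 < v.toNat := by omega
        have hstep : ∀ k, (PySem.List.pyRange 0 v 1).foldl
            (fun (s : PySem.Dict Int (List Int) × Int) _ =>
              (s.1.modify k [] (fun l => l ++ [s.2]), s.2 + 1)) (d, c)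
            = (d.modify k [] (fun l => l ++ PySem.List.pyRange c (c + v) 1), c + v) := by
          intro k
          rw [PySem.List.pyRange_one, List.foldl_map]
          have := pvInner k ((v - 0).toNat) d c (by omega)
          rw [this]
          rw [show ((v - 0).toNat : Int) = v by omega]
        by_cases hmod : PySem.Int.mod i 2 = 0
        · simp only [pvStepA, pvStepB, hv, hmod, if_pos]
          rw [hstep, show max v 0 = v from by omega]
          exact ih (i + 1) (c + v) _
        · simp only [pvStepA, pvStepB, hv, hmod, if_true, if_false]
          rw [hstep, show max v 0 = v from by omega]
          exact ih (i + 1) (c + v) _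
      · have hmax : max v 0 = 0 := by omega
        simp only [pvStepA, pvStepB, hv, if_false, hmax, add_zero]
        exact ih (i + 1) c d

-- ===== VERDICT (by name: the statement is the Claim_ definition above) =====
theorem expand_from_allocation_table_spec : Claim_equal_expand_from_allocation_table := by
  intro l _
  show expand_from_allocation_table l = expand_from_allocation_table_alt l
  simp only [expand_from_allocation_table, expand_from_allocation_table_alt]
  rw [pvStarts_fst l [] 0]
  simp only [List.nil_append]
  exact congrArg PySem.Dict.items (pvMain l 0 0 PySem.Dict.empty)
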